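-- pv_equiv track=rewrite | github.com/s26836-pj/bin_packing_problem | bin_packing_provlemV2.py | generate_all_valid_bin_packings
-- ===== SOURCE A (Python) =====
-- def generate_all_valid_bin_packings(items, bin_capacity):
--     results = []
--
--     def backtrack(remaining_items, current_bins):
--         if not remaining_items:
--             results.append(current_bins)
--             return
--
--         for i in range(len(current_bins)):
--             bin_copy = current_bins[i][:]
--             if sum(bin_copy) + remaining_items[0] <= bin_capacity:
--                 bin_copy.append(remaining_items[0])
--                 new_bins = current_bins[:i] + [bin_copy] + current_bins[i+1:]
--                 backtrack(remaining_items[1:], new_bins)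
--
--
--         backtrack(remaining_items[1:], current_bins + [[remaining_items[0]]])
--
--     # Tylko jedna permutacja (bo wszystkie rozkłady będą sprawdzane)
--     backtrack(items, [])
--     return results
-- ===== SOURCE B (Python) =====
-- def generate_all_valid_bin_packings(items, bin_capacity):
--     # Structural recursion over the bin list (no index slicing): all ways to
--     # place x into bins, in bin order, with the new-singleton-bin option last.
--     def place(x, bins):
--         if not bins:
--             return [[[x]]]
--         head, rest = bins[0], bins[1:]
--         options = [[head + [x]] + rest] if sum(head) + x <= bin_capacity else []
--         options += [[head] + o for o in place(x, rest)]
--         return options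
--
--     packings = [[]]
--     for x in items:
--         packings = [q for p in packings for q in place(x, p)]
--     return packings
-- ===== Notes on version B (the rewrite author's own statement) =====
-- stated objective: alternative
-- what changed: Replaces the results-mutating DFS recursion with index slicing by a single fold over the items, expanding a list of partial packings via a structural 'place' recursion over the bin list (no indices, no slices); leaf order is preserved because iterated flatMap yields the same lexicographic order as the DFS.
import Mathlib
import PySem

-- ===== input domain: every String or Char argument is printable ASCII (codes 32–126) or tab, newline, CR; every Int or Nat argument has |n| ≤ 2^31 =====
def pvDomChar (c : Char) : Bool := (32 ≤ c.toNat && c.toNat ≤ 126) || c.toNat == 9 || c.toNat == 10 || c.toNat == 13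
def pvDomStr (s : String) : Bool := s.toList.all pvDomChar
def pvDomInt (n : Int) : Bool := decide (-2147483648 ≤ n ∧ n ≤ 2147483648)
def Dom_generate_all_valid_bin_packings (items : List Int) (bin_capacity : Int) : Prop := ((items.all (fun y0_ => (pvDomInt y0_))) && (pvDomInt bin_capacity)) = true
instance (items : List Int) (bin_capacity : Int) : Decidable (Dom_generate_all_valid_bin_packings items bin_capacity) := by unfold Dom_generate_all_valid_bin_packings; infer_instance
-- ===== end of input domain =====

-- B replaces A's mutating DFS with index slicing by a fold over items that expands
-- partial packings via a structural recursion over the bin list (objective: alternative).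

-- ===== PORT A =====
-- backtrack: recursion on remaining_items; the for-loop over range(len(current_bins))
-- is the foldl over List.range (indices are in range, so getD/take/drop are exact
-- for Python's current_bins[i], [:i], [i+1:]); results accumulate in visit order.
def pvBacktrackA (bin_capacity : Int) : List Int → List (List Int) → List (List (List Int))
  | [], current_bins => [current_bins]
  | x :: rest, current_bins =>
      ((List.range current_bins.length).foldl
        (fun acc i =>
          let bin_copy := current_bins.getD i []
          if bin_copy.sum + x ≤ bin_capacity then
            acc ++ pvBacktrackA bin_capacity rest
              (current_bins.take i ++ [bin_copy ++ [x]] ++ current_bins.drop (i+1))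
          else acc) [])
      ++ pvBacktrackA bin_capacity rest (current_bins ++ [[x]])

def generate_all_valid_bin_packings (items : List Int) (bin_capacity : Int) : List (List (List Int)) :=
  pvBacktrackA bin_capacity items []

-- ===== PORT B =====
-- place x bins: every way to add x, in bin order, new singleton bin last.
def pvPlace (bin_capacity x : Int) : List (List Int) → List (List (List Int))
  | [] => [[[x]]]
  | head :: rest =>
      (if head.sum + x ≤ bin_capacity then [(head ++ [x]) :: rest] else [])
      ++ (pvPlace bin_capacity x rest).map (fun o => head :: o)

def generate_all_valid_bin_packings_alt (items : List Int) (bin_capacity : Int) : List (List (List Int)) :=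
  items.foldl (fun packings x => packings.flatMap (fun p => pvPlace bin_capacity x p)) [[]]

-- ===== PRECONDITION & SPEC =====
def Spec_generate_all_valid_bin_packings (items : List Int) (bin_capacity : Int) (out : List (List (List Int))) : Prop := out = generate_all_valid_bin_packings_alt items bin_capacity
instance (items : List Int) (bin_capacity : Int) (out : List (List (List Int))) : Decidable (Spec_generate_all_valid_bin_packings items bin_capacity out) := by unfold Spec_generate_all_valid_bin_packings; infer_instance

-- ===== CLAIM (what is proved, stated in full; the proofs are below) =====
def Claim_equal_generate_all_valid_bin_packings : Prop := ∀ (items : List Int) (bin_capacity : Int), Dom_generate_all_valid_bin_packings items bin_capacity → Spec_generate_all_valid_bin_packings items bin_capacity (generate_all_valid_bin_packings items bin_capacity)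

-- ===== LEMMAS AND PROOFS =====

-- A's loop shape: conditional-extend foldl as a flatMap
theorem pvFoldlIte {A B : Type} (c : A -> Prop) [DecidablePred c] (F : A -> List B) :
    forall (l : List A) (acc : List B),
      l.foldl (fun acc i => if c i then acc ++ F i else acc) acc
        = acc ++ l.flatMap (fun i => if c i then F i else []) := by
  intro l
  induction l with
  | nil => intro acc; simp
  | cons a l ih =>
    intro acc
    simp only [List.foldl_cons, List.flatMap_cons]
    rw [ih]
    split_ifs <;> simp

-- closed form of A's inner loop options at each index
def pvOptsIdx (bin_capacity x : Int) (bins : List (List Int)) : List (List (List Int)) :=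
  (List.range bins.length).flatMap (fun i =>
    if (bins.getD i []).sum + x <= bin_capacity then
      [bins.take i ++ [(bins.getD i []) ++ [x]] ++ bins.drop (i+1)]
    else [])

theorem pvOptsIdx_cons (bin_capacity x : Int) (head : List Int) (rest : List (List Int)) :
    pvOptsIdx bin_capacity x (head :: rest)
      = (if head.sum + x <= bin_capacity then [(head ++ [x]) :: rest] else [])
        ++ (pvOptsIdx bin_capacity x rest).map (fun o => head :: o) := by
  simp only [pvOptsIdx, List.length_cons, List.range_succ_eq_map, List.flatMap_cons,
    List.flatMap_map]
  congr 1
  rw [List.map_flatMap]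
  apply List.flatMap_congr
  intro i _
  simp only [Nat.succ_eq_add_one, List.getD_cons_succ, List.take_succ_cons, List.drop_succ_cons]
  split_ifs <;> simp

theorem pvPlace_eq (bin_capacity x : Int) (bins : List (List Int)) :
    pvPlace bin_capacity x bins = pvOptsIdx bin_capacity x bins ++ [bins ++ [[x]]] := by
  induction bins with
  | nil => simp [pvPlace, pvOptsIdx]
  | cons head rest ih =>
    rw [pvOptsIdx_cons]
    simp only [pvPlace, ih, List.map_append, List.map_cons, List.map_nil]
    simp [List.append_assoc]

theorem pvBacktrackA_cons (bin_capacity x : Int) (rest : List Int) (bins : List (List Int)) :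
    pvBacktrackA bin_capacity (x :: rest) bins
      = (pvPlace bin_capacity x bins).flatMap (pvBacktrackA bin_capacity rest) := by
  rw [pvPlace_eq]
  simp only [pvBacktrackA]
  rw [pvFoldlIte (fun i => (bins.getD i []).sum + x <= bin_capacity)
        (fun i => pvBacktrackA bin_capacity rest
          (bins.take i ++ [(bins.getD i []) ++ [x]] ++ bins.drop (i+1)))
        (List.range bins.length) []]
  simp only [List.nil_append, List.flatMap_append, List.flatMap_cons, List.flatMap_nil,
    List.append_nil]
  congr 1
  simp only [pvOptsIdx]
  rw [List.flatMap_assoc]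
  apply List.flatMap_congr
  intro i _
  split_ifs <;> simp

theorem pvFoldl_eq (bin_capacity : Int) (items : List Int) :
    forall L : List (List (List Int)),
      items.foldl (fun packings x => packings.flatMap (fun p => pvPlace bin_capacity x p)) L
        = L.flatMap (pvBacktrackA bin_capacity items) := by
  induction items with
  | nil => intro L; simp [pvBacktrackA]
  | cons x rest ih =>
    intro L
    simp only [List.foldl_cons]
    rw [ih, List.flatMap_assoc]
    apply List.flatMap_congr
    intro bins _
    exact (pvBacktrackA_cons bin_capacity x rest bins).symm

-- ===== VERDICT (by name: the statement is the Claim_ definition above) =====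
theorem generate_all_valid_bin_packings_spec : Claim_equal_generate_all_valid_bin_packings := by
  intro items bin_capacity _
  show _ = _
  rw [generate_all_valid_bin_packings, generate_all_valid_bin_packings_alt,
    pvFoldl_eq bin_capacity items [[]]]
  simp
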